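-- pv_equiv track=rewrite | github.com/Amihaeseisergiu/Machine-Learning | Homework1/id3.py | splitTable
-- ===== SOURCE A (Python) =====
-- def splitTable(data, node, val):
--     ret = {}
--     for i in list(data.keys()):
--         if i != node:
--             ret[i] = []
--
--     for i in range(0, len(data[node])):
--         if data[node][i] == val:
--             for j in list(data.keys()):
--                 if j != node:
--                     ret[j].append(data[j][i])
--     return ret
-- ===== SOURCE B (Python) =====
-- def splitTable(data, node, val):
--     keys = list(data)
--     ni = keys.index(node)
--     kept = [row for row in zip(*data.values()) if row[ni] == val]
--     return {k: [row[c] for row in kept] for c, k in enumerate(keys) if k != node}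
-- ===== Notes on version B (the rewrite author's own statement) =====
-- stated objective: alternative
-- what changed: A fills a dict of per-column accumulator lists column-keyed (appending one cell to every column's list for each matching row); B transposes the table into row tuples with zip(*data.values()), filters whole rows by the positional index of node, and projects the kept rows back into columns.
import Mathlib
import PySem

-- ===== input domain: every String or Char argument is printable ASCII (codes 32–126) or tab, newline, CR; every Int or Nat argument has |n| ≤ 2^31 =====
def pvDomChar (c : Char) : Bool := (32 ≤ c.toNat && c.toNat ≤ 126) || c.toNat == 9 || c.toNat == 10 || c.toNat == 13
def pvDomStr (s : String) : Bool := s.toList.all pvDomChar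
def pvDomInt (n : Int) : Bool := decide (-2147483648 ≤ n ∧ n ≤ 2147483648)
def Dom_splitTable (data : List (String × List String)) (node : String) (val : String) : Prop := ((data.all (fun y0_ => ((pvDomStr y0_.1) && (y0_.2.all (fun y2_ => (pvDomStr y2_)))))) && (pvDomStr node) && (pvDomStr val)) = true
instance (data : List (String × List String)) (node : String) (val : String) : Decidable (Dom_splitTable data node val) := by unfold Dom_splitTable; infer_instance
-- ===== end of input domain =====

-- B replaces A's column-keyed dict filling (append one cell per column per matching row) by a
-- transpose-based algorithm: view the table as row tuples (zip of the columns), filter whole rows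
-- by position, then project the kept rows back to columns (alternative decomposition, same cost).

-- ===== PORT A =====
-- A builds ret as a dict: empty lists for every key ≠ node, then for each row index i with
-- data[node][i] == val appends data[j][i] to ret[j] for every j ≠ node.
def splitTable (data : List (String × List String)) (node : String) (val : String) : List (String × List String) :=
  let d := PySem.Dict.mk data
  let ret : PySem.Dict String (List String) :=
    (data.map Prod.fst).foldl (fun r i => if i ≠ node then r.insert i [] else r) PySem.Dict.empty
  let col := d.getD node []
  ((PySem.List.pyRange 0 (col.length : Int) 1).foldl (fun r i =>
      if PySem.List.pyGetD col i "" = val then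
        (data.map Prod.fst).foldl
          (fun r j => if j ≠ node then r.modify j [] (fun v => v ++ [PySem.List.pyGetD (d.getD j []) i ""]) else r) r
      else r) ret).items

-- ===== PORT B =====
-- B: keys = list(data); ni = keys.index(node); kept = rows of zip(*data.values()) whose ni-th
-- entry equals val; result column c (key ≠ node) is the c-th entry of each kept row.
-- zip(*cols) (a stdlib call) is ported as its meaning: the rows with index below the minimum
-- column length.  keys.index raises ValueError when node is absent (outside Pre_): port yields [].
def splitTable_alt (data : List (String × List String)) (node : String) (val : String) : List (String × List String) :=
  let keys := data.map Prod.fst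
  match PySem.List.index? keys node with
  | none => []
  | some ni =>
    let cols := data.map Prod.snd
    let m := ((cols.map List.length).min?).getD 0
    let kept := ((List.range m).map (fun i => cols.map (fun c => c.getD i ""))).filter
        (fun row => row.getD ni "" = val)
    keys.zipIdx.filterMap (fun p =>
      if p.1 ≠ node then some (p.1, kept.map (fun row => row.getD p.2 "")) else none)

-- ===== PRECONDITION & SPEC =====
-- Pre_ excludes association lists with duplicate keys (they do not represent a Python dict),
-- inputs where node is not a key (A raises KeyError), and tables where some matching row index
-- reaches past the end of another column (A raises IndexError).
def Pre_splitTable (data : List (String × List String)) (node : String) (val : String) : Prop :=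
  (data.map Prod.fst).Nodup ∧ node ∈ data.map Prod.fst ∧
  ∀ p ∈ data, ∀ i : Nat, i < ((PySem.Dict.mk data).getD node []).length →
    ((PySem.Dict.mk data).getD node []).getD i "" = val → i < p.2.length
instance (data : List (String × List String)) (node : String) (val : String) : Decidable (Pre_splitTable data node val) := by unfold Pre_splitTable; infer_instance

def pvWitness_splitTable : (List (String × List String)) × String × String :=
  ([("a", ["x", "y", "x"]), ("b", ["1", "2", "3"])], "a", "x")

def Spec_splitTable (data : List (String × List String)) (node : String) (val : String) (out : List (String × List String)) : Prop := out = splitTable_alt data node val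
instance (data : List (String × List String)) (node : String) (val : String) (out : List (String × List String)) : Decidable (Spec_splitTable data node val out) := by unfold Spec_splitTable; infer_instance

-- ===== CLAIM (what is proved, stated in full; the proofs are below) =====
def Claim_equal_splitTable : Prop := ∀ (data : List (String × List String)) (node : String) (val : String), Dom_splitTable data node val → Pre_splitTable data node val → Spec_splitTable data node val (splitTable data node val)

-- ===== LEMMAS AND PROOFS =====

-- proof-only common normal form of both ports
def normF (data : List (String × List String)) (node : String) (val : String) : List (String × List String) :=
  let col := (PySem.Dict.mk data).getD node []
  (data.filter (fun p => p.1 ≠ node)).map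
    (fun p => (p.1, ((List.range col.length).filter (fun i => col.getD i "" = val)).map
        (fun i => p.2.getD i "")))


-- proof-only helper: the matching indices among the first n rows
def idxUpTo (col : List String) (val : String) (n : Nat) : List Int :=
  (List.range n).filterMap (fun i => if col.getD i "" = val then some (i : Int) else none)

lemma idxUpTo_succ (col : List String) (val : String) (n : Nat) :
    idxUpTo col val (n+1)
    = idxUpTo col val n ++ (if col.getD n "" = val then [(n : Int)] else []) := by
  unfold idxUpTo
  rw [List.range_succ, List.filterMap_append]
  by_cases h : col.getD n "" = val <;>
    simp [← List.getD_eq_getElem?_getD, h]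

lemma inner_getD (js : List String) (node : String) (g : String → String)
    (r : PySem.Dict String (List String)) (k : String) (hnd : js.Nodup) :
    (js.foldl (fun r j => if j ≠ node then r.modify j [] (fun v => v ++ [g j]) else r) r).getD k []
    = if k ∈ js ∧ k ≠ node then r.getD k [] ++ [g k] else r.getD k [] := by
  induction js generalizing r with
  | nil => simp
  | cons a t ih =>
    rw [List.nodup_cons] at hnd
    rw [List.foldl_cons, ih _ hnd.2]
    by_cases ha : a = node
    · subst ha
      simp only [ne_eq, not_true_eq_false, if_false]
      by_cases hk : k ∈ t ∧ k ≠ a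
      · rw [if_pos hk, if_pos ⟨List.mem_cons_of_mem _ hk.1, hk.2⟩]
      · rw [if_neg hk]
        rw [if_neg]
        intro ⟨h1, h2⟩
        rcases List.mem_cons.mp h1 with h | h
        · exact h2 h
        · exact hk ⟨h, h2⟩
    · rw [if_pos ha]
      by_cases hk : k ∈ t ∧ k ≠ node
      · rw [if_pos hk, if_pos ⟨List.mem_cons_of_mem _ hk.1, hk.2⟩]
        rw [PySem.Dict.getD_modify]
        rw [if_neg (by rintro rfl; exact hnd.1 hk.1)]
      · rw [if_neg hk, PySem.Dict.getD_modify]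
        by_cases hka : k = a
        · subst hka
          rw [if_pos rfl, if_pos ⟨List.mem_cons_self, ha⟩]
        · rw [if_neg hka, if_neg]
          intro ⟨h1, h2⟩
          rcases List.mem_cons.mp h1 with h | h
          · exact hka h
          · exact hk ⟨h, h2⟩

lemma inner_keys (js : List String) (node : String) (g : String → String)
    (r : PySem.Dict String (List String))
    (h : ∀ j ∈ js, j ≠ node → j ∈ r.keys) :
    (js.foldl (fun r j => if j ≠ node then r.modify j [] (fun v => v ++ [g j]) else r) r).keys
    = r.keys := by
  induction js generalizing r with
  | nil => rfl
  | cons a t ih =>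
    rw [List.foldl_cons]
    by_cases ha : a = node
    · subst ha
      simp only [ne_eq, not_true_eq_false, if_false]
      exact ih r (fun j hj => h j (List.mem_cons_of_mem _ hj))
    · rw [if_pos ha]
      have hk : (r.modify a [] (fun v => v ++ [g a])).keys = r.keys := by
        rw [PySem.Dict.keys_modify, PySem.Dict.keys_insert_of_contains]
        exact (PySem.Dict.contains_iff_mem_keys _ _).mpr (h a List.mem_cons_self ha)
      rw [ih _ (by intro j hj hjn; rw [hk]; exact h j (List.mem_cons_of_mem _ hj) hjn), hk]

-- a guarded foldl is a foldl over the filtered list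
lemma foldl_ite {α β : Type} (p : α → Prop) [DecidablePred p] (f : β → α → β) (l : List α) (init : β) :
    l.foldl (fun r x => if p x then f r x else r) init
    = (l.filter (fun x => decide (p x))).foldl f init := by
  induction l generalizing init with
  | nil => rfl
  | cons a t ih =>
    rw [List.foldl_cons, List.filter_cons]
    by_cases h : p a
    · simp [h, ih]
    · simp [h, ih]

lemma ret0_items (data : List (String × List String)) (node : String)
    (hnd : (data.map Prod.fst).Nodup) :
    ((data.map Prod.fst).foldl (fun r i => if i ≠ node then r.insert i ([] : List String) else r)
      PySem.Dict.empty).items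
    = (data.filter (fun p => p.1 ≠ node)).map (fun p => (p.1, ([] : List String))) := by
  rw [foldl_ite (fun i => i ≠ node)]
  rw [PySem.Dict.items_foldl_insert_fresh _ (fun x => x) (fun _ => ([]:List String)) _ (by simp) ?nd]
  case nd => simpa using hnd.filter _
  show [] ++ _ = _
  rw [List.nil_append, List.filter_map, List.map_map]
  rfl

lemma outer_getD (d : PySem.Dict String (List String)) (col : List String) (val node : String)
    (js : List String) (hnd : js.Nodup) (r0 : PySem.Dict String (List String))
    (k : String) (hk : k ∈ js) (hkn : k ≠ node) (n : Nat) :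
    ((PySem.List.pyRange 0 (n : Int) 1).foldl (fun r i =>
        if PySem.List.pyGetD col i "" = val then
          js.foldl (fun r j => if j ≠ node then r.modify j [] (fun v => v ++ [PySem.List.pyGetD (d.getD j []) i ""]) else r) r
        else r) r0).getD k []
    = r0.getD k [] ++ (idxUpTo col val n).map (fun i => PySem.List.pyGetD (d.getD k []) i "") := by
  induction n with
  | zero =>
    rw [show ((0:Nat):Int) = 0 from rfl, PySem.List.pyRange_one_eq_nil le_rfl]
    simp [idxUpTo]
  | succ n ih =>
    rw [show ((n+1:Nat):Int) = (n:Int)+1 from by push_cast; ring,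
        PySem.List.pyRange_one_succ_right (by positivity), List.foldl_append,
        List.foldl_cons, List.foldl_nil, idxUpTo_succ]
    by_cases hm : PySem.List.pyGetD col (n:Int) "" = val
    · rw [if_pos hm, inner_getD _ _ _ _ _ hnd, if_pos ⟨hk, hkn⟩, ih]
      have hm' : col.getD n "" = val := by simpa using hm
      rw [if_pos hm']
      simp
    · rw [if_neg hm]
      have hm' : ¬ col.getD n "" = val := by simpa using hm
      rw [if_neg hm', ih]
      simp

lemma outer_keys (d : PySem.Dict String (List String)) (col : List String) (val node : String)
    (js : List String) (r0 : PySem.Dict String (List String))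
    (h : ∀ j ∈ js, j ≠ node → j ∈ r0.keys) (n : Nat) :
    ((PySem.List.pyRange 0 (n : Int) 1).foldl (fun r i =>
        if PySem.List.pyGetD col i "" = val then
          js.foldl (fun r j => if j ≠ node then r.modify j [] (fun v => v ++ [PySem.List.pyGetD (d.getD j []) i ""]) else r) r
        else r) r0).keys
    = r0.keys := by
  induction n with
  | zero =>
    rw [show ((0:Nat):Int) = 0 from rfl, PySem.List.pyRange_one_eq_nil le_rfl]
    rfl
  | succ n ih =>
    rw [show ((n+1:Nat):Int) = (n:Int)+1 from by push_cast; ring,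
        PySem.List.pyRange_one_succ_right (by positivity), List.foldl_append,
        List.foldl_cons, List.foldl_nil]
    by_cases hm : PySem.List.pyGetD col (n:Int) "" = val
    · rw [if_pos hm, inner_keys _ _ _ _ (by rw [ih]; exact h), ih]
    · rw [if_neg hm, ih]

-- mapping a (possibly different) getter over the matching Int indices = filter-then-map over Nat indices
-- filterMap with an if-guard is filter-then-map
lemma filterMap_if {α β : Type} (p : α → Bool) (f : α → β) (l : List α) :
    l.filterMap (fun x => if p x then some (f x) else none) = (l.filter p).map f := by
  induction l with
  | nil => rfl
  | cons a t ih =>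
    rw [List.filterMap_cons, List.filter_cons]
    by_cases h : p a <;> simp [h, ih]

lemma idxUpTo_map (xs col : List String) (val : String) (n : Nat) :
    (idxUpTo col val n).map (fun i => PySem.List.pyGetD xs i "")
    = ((List.range n).filter (fun i => col.getD i "" = val)).map (fun i => xs.getD i "") := by
  unfold idxUpTo
  rw [List.map_filterMap]
  have h1 : ∀ x : Nat,
      Option.map (fun i => PySem.List.pyGetD xs i "") (if col.getD x "" = val then some (x : Int) else none)
      = if (fun i => decide (col.getD i "" = val)) x then some (xs.getD x "") else none := by
    intro x
    by_cases h : col.getD x "" = val <;> simp [PySem.List.pyGetD_natCast]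
  simp only [h1]
  exact filterMap_if _ _ _

-- A equals the normal form on Pre_
lemma A_norm (data : List (String × List String)) (node : String) (val : String)
    (hpre : Pre_splitTable data node val) : splitTable data node val = normF data node val := by
  obtain ⟨hnd, _hnode, _hlen⟩ := hpre
  simp only [splitTable, normF]
  set d := PySem.Dict.mk data with hd
  set col := d.getD node [] with hcol
  set fl := data.filter (fun p => p.1 ≠ node) with hfl
  have hsub : (fl.map Prod.fst).Sublist (data.map Prod.fst) := List.filter_sublist.map _
  have hflnd : (fl.map Prod.fst).Nodup := hnd.sublist hsub
  have hr0 := ret0_items data node hnd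
  set r0 := (data.map Prod.fst).foldl (fun r i => if i ≠ node then r.insert i ([] : List String) else r) PySem.Dict.empty with hr0def
  have hr0keys : r0.keys = fl.map Prod.fst := by
    simp only [PySem.Dict.keys, hr0, hfl, List.map_map]
    rfl
  have hmemkeys : ∀ j ∈ data.map Prod.fst, j ≠ node → j ∈ r0.keys := by
    intro j hj hjn
    rw [hr0keys]
    obtain ⟨p, hp, rfl⟩ := List.mem_map.mp hj
    exact List.mem_map_of_mem (List.mem_filter.mpr ⟨hp, by simpa using hjn⟩)
  set F := ((PySem.List.pyRange 0 (col.length : Int) 1).foldl (fun r i =>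
      if PySem.List.pyGetD col i "" = val then
        (data.map Prod.fst).foldl
          (fun r j => if j ≠ node then r.modify j [] (fun v => v ++ [PySem.List.pyGetD (d.getD j []) i ""]) else r) r
      else r) r0) with hF
  have hFkeys : F.keys = fl.map Prod.fst := by
    rw [hF, outer_keys d col val node _ r0 hmemkeys, hr0keys]
  have hFnodup : F.keys.Nodup := by rw [hFkeys]; exact hflnd
  rw [PySem.Dict.items_eq_map_keys F hFnodup [], hFkeys, List.map_map]
  apply List.map_congr_left
  intro p hp
  have hpdata : p ∈ data := (List.mem_filter.mp hp).1
  have hpn : p.1 ≠ node := by simpa using (List.mem_filter.mp hp).2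
  have hpk : p.1 ∈ data.map Prod.fst := List.mem_map_of_mem hpdata
  have hget : d.getD p.1 [] = p.2 :=
    PySem.Dict.getD_of_mem_items d (k := p.1) (v := p.2) hpdata hnd []
  have hr0get : r0.getD p.1 [] = [] := by
    apply PySem.Dict.getD_of_mem_items r0 (v := ([] : List String)) _ (by rw [hr0keys]; exact hflnd)
    rw [hr0]
    exact List.mem_map.mpr ⟨p, List.mem_filter.mpr ⟨hpdata, by simpa using hpn⟩, rfl⟩
  simp only [Function.comp]
  rw [outer_getD d col val node (data.map Prod.fst) hnd r0 p.1 hpk hpn col.length, hr0get,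
      List.nil_append, hget, idxUpTo_map]


-- filterMap with a decidable-Prop guard is filter-then-map
lemma filterMap_ite {α β : Type} (p : α → Prop) [DecidablePred p] (f : α → β) (l : List α) :
    l.filterMap (fun x => if p x then some (f x) else none)
    = (l.filter (fun x => decide (p x))).map f := by
  induction l with
  | nil => rfl
  | cons a t ih =>
    rw [List.filterMap_cons, List.filter_cons]
    by_cases h : p a <;> simp [h, ih]

-- filterMap over zipIdx with an index-independent function
lemma filterMap_zipIdx_fst {α β : Type} (l : List α) (s : Nat) (G : α → Option β) :
    (l.zipIdx s).filterMap (G ∘ Prod.fst) = l.filterMap G := by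
  induction l generalizing s with
  | nil => rfl
  | cons a t ih =>
    simp only [Function.comp] at ih ⊢
    cases h : G a <;> simp [List.zipIdx_cons, h, ih]

lemma filter_range_le (P : Nat → Bool) (m n : Nat) (hmn : m ≤ n)
    (h : ∀ i, P i = true → i < n → i < m) :
    (List.range m).filter P = (List.range n).filter P := by
  obtain ⟨k, rfl⟩ := Nat.exists_eq_add_of_le hmn
  rw [List.range_add, List.filter_append]
  have hnil : List.filter P (List.map (fun x => m + x) (List.range k)) = [] := by
    rw [List.filter_eq_nil_iff]
    intro a ha hPa
    obtain ⟨j, hj, rfl⟩ := List.mem_map.mp ha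
    have := h _ hPa (by have := List.mem_range.mp hj; omega)
    omega
  rw [hnil, List.append_nil]

lemma filter_range_congr (P : Nat → Bool) (m n : Nat)
    (h : ∀ i, P i = true → (i < m ↔ i < n)) :
    (List.range m).filter P = (List.range n).filter P := by
  rcases le_total m n with hmn | hnm
  · exact filter_range_le P m n hmn (fun i hP hi => (h i hP).mpr hi)
  · exact (filter_range_le P n m hnm (fun i hP hi => (h i hP).mp hi)).symm

-- B equals the normal form on Pre_
lemma B_norm (data : List (String × List String)) (node : String) (val : String)
    (hpre : Pre_splitTable data node val) : splitTable_alt data node val = normF data node val := by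
  obtain ⟨hnd, hnode, hlen⟩ := hpre
  have hsome : (PySem.List.index? (data.map Prod.fst) node).isSome :=
    (PySem.List.index?_isSome_iff _ _).mpr hnode
  obtain ⟨ni, hni⟩ := Option.isSome_iff_exists.mp hsome
  obtain ⟨hlt, hkey, -⟩ := PySem.List.getElem_of_index?_eq_some hni
  simp only [splitTable_alt, hni]
  set cols := data.map Prod.snd with hcols
  have hnid : ni < data.length := by simpa using hlt
  have hnic : ni < cols.length := by simpa [hcols] using hnid
  have hfst : (data[ni]'hnid).1 = node := by simpa using hkey
  set col := cols[ni]'hnic with hcol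
  have hcol2 : col = (data[ni]'hnid).2 := by simp [hcol, hcols]
  have hcolget : (PySem.Dict.mk data).getD node [] = col := by
    have hm : (node, (data[ni]'hnid).2) ∈ data := by
      rw [← hfst]; exact List.getElem_mem _
    rw [PySem.Dict.getD_of_mem_items (PySem.Dict.mk data) hm hnd [], hcol2]
  set m := ((cols.map List.length).min?).getD 0 with hmdef
  obtain ⟨m0, hm0⟩ : ∃ m0, (cols.map List.length).min? = some m0 := by
    cases hc : (cols.map List.length).min? with
    | none =>
      exfalso
      have := List.min?_eq_none_iff.mp hc
      simp only [List.map_eq_nil_iff] at this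
      rw [this] at hnic
      simp at hnic
    | some x => exact ⟨x, rfl⟩
  obtain ⟨hm0mem, hm0le⟩ := List.min?_eq_some_iff.mp hm0
  have hmm : m = m0 := by rw [hmdef, hm0]; rfl
  have hrow : ∀ i : Nat, (cols.map (fun c => c.getD i "")).getD ni "" = col.getD i "" := by
    intro i
    rw [List.getD_eq_getElem?_getD, List.getElem?_map, List.getElem?_eq_getElem hnic]
    simp [hcol]
  have hkept : ((List.range m).map (fun i => cols.map (fun c => c.getD i ""))).filter
        (fun row => decide (row.getD ni "" = val))
      = ((List.range col.length).filter (fun i => decide (col.getD i "" = val))).map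
          (fun i => cols.map (fun c => c.getD i "")) := by
    rw [List.filter_map]
    have hpred : ((fun row => decide (row.getD ni "" = val)) ∘ (fun i => cols.map (fun c => c.getD i "")))
        = fun i => decide (col.getD i "" = val) := by
      funext i
      simp only [Function.comp, hrow i]
    rw [hpred]
    congr 1
    apply filter_range_congr
    intro i hP
    have hPv : col.getD i "" = val := of_decide_eq_true hP
    constructor
    · intro him
      have hle : m0 ≤ col.length := hm0le _ (List.mem_map.mpr ⟨col, List.getElem_mem _, rfl⟩)
      omega
    · intro hic
      obtain ⟨c, hc, hcl⟩ := List.mem_map.mp hm0mem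
      obtain ⟨p, hp, rfl⟩ := List.mem_map.mp hc
      have hi2 : i < p.2.length :=
        hlen p hp i (by rw [hcolget]; exact hic) (by rw [hcolget]; exact hPv)
      omega
  rw [hkept, List.zipIdx_map, List.filterMap_map]
  rw [List.filterMap_congr (g := (fun p : String × List String =>
      if p.1 ≠ node then
        some (p.1, ((List.range col.length).filter (fun i => decide (col.getD i "" = val))).map
          (fun i => p.2.getD i "")) else none) ∘ Prod.fst) ?_]
  · rw [filterMap_zipIdx_fst, filterMap_ite]
    simp only [normF, hcolget]
  · intro q hq
    obtain ⟨p, c⟩ := q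
    obtain ⟨-, hc2, hpc⟩ := List.mem_zipIdx hq
    simp only [Nat.zero_add] at hc2
    simp only [Prod.map, Function.comp, id]
    have hcd : c < data.length := by omega
    have hval :
        (((List.range col.length).filter (fun i => decide (col.getD i "" = val))).map
          (fun i => cols.map (fun c => c.getD i ""))).map (fun row => row.getD c "")
        = ((List.range col.length).filter (fun i => decide (col.getD i "" = val))).map
          (fun i => p.2.getD i "") := by
      rw [List.map_map]
      apply List.map_congr_left
      intro j _
      simp only [Function.comp]
      have hcc : c < cols.length := by simpa [hcols] using hcd
      rw [List.getD_eq_getElem?_getD, List.getElem?_map, List.getElem?_eq_getElem hcc]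
      have : cols[c]'hcc = p.2 := by
        simp [hcols]
        rw [show data[c]'hcd = p from by rw [hpc]; simp]
      simp [this]
    rw [hval]

-- ===== VERDICT (by name: the statement is the Claim_ definition above) =====
theorem splitTable_spec : Claim_equal_splitTable := by
  intro data node val _hdom hpre
  unfold Spec_splitTable
  rw [A_norm data node val hpre, B_norm data node val hpre]
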